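-- pv_equiv track=rewrite | github.com/terrier-org/pyterrier | pyterrier/terrier/tokeniser.py | check
-- ===== SOURCE A (Python) =====
-- class BaseTokeniser():
--     LOWERCASE = True
--     maxNumOfSameConseqLettersPerTerm = 3
--     maxNumOfDigitsPerTerm = 4
--     MAX_TERM_LENGTH = 20
--
-- def check(s : str) -> str:
--     # if the s is None
--     # or if it is longer than a specified length
--     s = s.strip()
--     counter = 0
--     counterdigit = 0
--     ch = -1
--     for chNew in s:
--         if chNew.isdigit():
--             counterdigit += 1
--         if ch == chNew:
--             counter += 1
--         else:
--             counter = 1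
--         ch = chNew
--         # if it contains more than 4 consecutive same letters,
--         # or more than 4 digits, then discard the term.
--         if counter > BaseTokeniser.maxNumOfSameConseqLettersPerTerm or counterdigit > BaseTokeniser.maxNumOfDigitsPerTerm:
--             return ""
--     return s.lower() if BaseTokeniser.LOWERCASE else s
-- ===== SOURCE B (Python) =====
-- class BaseTokeniser():
--     LOWERCASE = True
--     maxNumOfSameConseqLettersPerTerm = 3
--     maxNumOfDigitsPerTerm = 4
--     MAX_TERM_LENGTH = 20
--
-- def check(s : str) -> str:
--     s = s.strip()
--     if sum(c.isdigit() for c in s) > BaseTokeniser.maxNumOfDigitsPerTerm: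
--         return ""
--     w = BaseTokeniser.maxNumOfSameConseqLettersPerTerm + 1
--     if any(len(set(s[i:i+w])) == 1 for i in range(len(s) - w + 1)):
--         return ""
--     return s.lower() if BaseTokeniser.LOWERCASE else s
-- ===== Notes on version B (the rewrite author's own statement) =====
-- stated objective: simpler
-- what changed: Replaces the single stateful early-exit scan threading a running same-char counter, a digit counter and the previous character with two independent whole-string aggregates: a total digit count and an index-window test for w identical consecutive characters.
import Mathlib
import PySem

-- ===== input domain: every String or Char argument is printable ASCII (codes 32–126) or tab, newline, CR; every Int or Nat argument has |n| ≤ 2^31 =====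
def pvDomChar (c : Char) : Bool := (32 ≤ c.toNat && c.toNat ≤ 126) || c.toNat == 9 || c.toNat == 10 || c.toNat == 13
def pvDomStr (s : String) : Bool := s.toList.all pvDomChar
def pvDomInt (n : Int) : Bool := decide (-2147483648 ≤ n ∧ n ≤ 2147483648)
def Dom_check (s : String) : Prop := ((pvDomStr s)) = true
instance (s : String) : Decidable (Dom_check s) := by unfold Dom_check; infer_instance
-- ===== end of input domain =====

-- B replaces A's stateful early-exit scan (running same-char counter + digit counter + previous
-- char) by two independent whole-string aggregates: total digit count and a window test for w
-- identical consecutive characters (objective: simpler decomposition, same return value).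

def BaseTokeniser_LOWERCASE : Bool := true
def BaseTokeniser_maxNumOfSameConseqLettersPerTerm : Int := 3
def BaseTokeniser_maxNumOfDigitsPerTerm : Int := 4

-- ===== PORT A =====
-- the for-loop with early return; ch = -1 (an int, never equal to a character) is ported as none
def checkLoop (t : String) : List Char → Int → Int → Option Char → String
  | [], _, _, _ => if BaseTokeniser_LOWERCASE then PySem.Str.lower t else t
  | chNew :: rest, counter, counterdigit, ch =>
      let counterdigit := if PySem.Chars.isdigit chNew then counterdigit + 1 else counterdigit
      let counter := if ch = some chNew then counter + 1 else 1
      if counter > BaseTokeniser_maxNumOfSameConseqLettersPerTerm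
          ∨ counterdigit > BaseTokeniser_maxNumOfDigitsPerTerm then ""
      else checkLoop t rest counter counterdigit (some chNew)

def check (s : String) : String :=
  let s := PySem.Str.strip s
  checkLoop s s.toList 0 0 none

-- ===== PORT B =====
def check_alt (s : String) : String :=
  let s := PySem.Str.strip s
  let l := s.toList
  if ((l.countP (fun c => PySem.Chars.isdigit c) : Int)) > BaseTokeniser_maxNumOfDigitsPerTerm then ""
  else
    let w : Int := BaseTokeniser_maxNumOfSameConseqLettersPerTerm + 1
    if (PySem.List.pyRange 0 ((l.length : Int) - w + 1) 1).any
        (fun i => PySem.Set.len (PySem.Set.ofList (PySem.List.slice l (some i) (some (i + w)))) == 1)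
    then ""
    else if BaseTokeniser_LOWERCASE then PySem.Str.lower s else s

-- ===== PRECONDITION & SPEC =====
def Spec_check (s : String) (out : String) : Prop := out = check_alt s
instance (s : String) (out : String) : Decidable (Spec_check s out) := by unfold Spec_check; infer_instance

-- ===== CLAIM (what is proved, stated in full; the proofs are below) =====
def Claim_equal_check : Prop := ∀ (s : String), Dom_check s → Spec_check s (check s)

-- ===== LEMMAS AND PROOFS =====

/-- digit count of a character list -/
def pvDigits (l : List Char) : Nat := l.countP (fun c => PySem.Chars.isdigit c)

/-- A's run logic alone (no digit counting) -/
def pvRb : List Char → Int → Option Char → Bool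
  | [], _, _ => false
  | c :: rest, counter, ch =>
      decide ((if ch = some c then counter + 1 else 1) > 3) ||
        pvRb rest (if ch = some c then counter + 1 else 1) (some c)

/-- 'contains four equal consecutive characters', structurally -/
def pvRun4 : List Char → Bool
  | a :: b :: c :: d :: rest => decide (b = a ∧ c = a ∧ d = a) || pvRun4 (b :: c :: d :: rest)
  | _ => false

/-- length of the leading run of a -/
def pvPrefRun (l : List Char) (a : Char) : Nat := (l.takeWhile (· == a)).length

theorem pvPrefRun_cons_self (l : List Char) (a : Char) : pvPrefRun (a :: l) a = pvPrefRun l a + 1 := by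
  simp [pvPrefRun]

theorem pvPrefRun_cons_ne (l : List Char) (a x : Char) (h : x ≠ a) : pvPrefRun (x :: l) a = 0 := by
  simp [pvPrefRun, h]

theorem pvPrefRun_le (l : List Char) (a : Char) : pvPrefRun l a ≤ l.length := by
  induction l with
  | nil => simp [pvPrefRun]
  | cons x r ih =>
      by_cases h : x = a
      · subst h; rw [pvPrefRun_cons_self]; simp; omega
      · rw [pvPrefRun_cons_ne _ _ _ h]; simp

theorem pvRun4_cons (x : Char) (rest : List Char) :
    pvRun4 (x :: rest) = (decide (4 ≤ pvPrefRun (x :: rest) x) || pvRun4 rest) := by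
  match rest with
  | [] =>
      have hle : pvPrefRun [x] x ≤ 1 := by simpa using pvPrefRun_le [x] x
      have h4 : ¬ (4 ≤ pvPrefRun [x] x) := by omega
      simp [pvRun4, h4]
  | [b] =>
      have hle : pvPrefRun [x, b] x ≤ 2 := by simpa using pvPrefRun_le [x, b] x
      have h4 : ¬ (4 ≤ pvPrefRun [x, b] x) := by omega
      simp [pvRun4, h4]
  | [b, c] =>
      have hle : pvPrefRun [x, b, c] x ≤ 3 := by simpa using pvPrefRun_le [x, b, c] x
      have h4 : ¬ (4 ≤ pvPrefRun [x, b, c] x) := by omega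
      simp [pvRun4, h4]
  | b :: c :: d :: r =>
      have h : (4 ≤ pvPrefRun (x :: b :: c :: d :: r) x) ↔ (b = x ∧ c = x ∧ d = x) := by
        constructor
        · intro h4
          by_cases hb : b = x
          · by_cases hc : c = x
            · by_cases hd : d = x
              · exact ⟨hb, hc, hd⟩
              · exfalso; simp [pvPrefRun, hb, hc, hd] at h4
            · exfalso; simp [pvPrefRun, hb, hc] at h4
          · exfalso; simp [pvPrefRun, hb] at h4
        · rintro ⟨hb, hc, hd⟩
          rw [hb, hc, hd]
          have := pvPrefRun_cons_self (x :: x :: x :: r) x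
          have := pvPrefRun_cons_self (x :: x :: r) x
          have := pvPrefRun_cons_self (x :: r) x
          have := pvPrefRun_cons_self r x
          omega
      simp only [pvRun4]
      rw [show decide (4 ≤ pvPrefRun (x :: b :: c :: d :: r) x) = decide (b = x ∧ c = x ∧ d = x) from
        decide_eq_decide.mpr (by rw [h])]

theorem pvRb_some (l : List Char) : ∀ (c : Int) (a : Char), c ≤ 3 →
    1 ≤ c → pvRb l c (some a) = (decide (c + (pvPrefRun l a : Int) > 3) || pvRun4 l) := by
  induction l with
  | nil =>
      intro c a hc h1
      simp only [pvRb, pvRun4, Bool.or_false]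
      rw [show pvPrefRun [] a = 0 from rfl]
      have hd : decide (c + ((0:Nat) : Int) > 3) = false := decide_eq_false (by omega)
      rw [hd]
  | cons x rest ih =>
      intro c a hc h1
      by_cases hx : x = a
      · rw [hx] at *
        simp only [pvRb]
        simp only [if_pos trivial]
        by_cases h3 : c + 1 > 3
        · have h4 : (3 : Int) < c + (pvPrefRun (a :: rest) a : Int) := by
            have := pvPrefRun_cons_self rest a
            omega
          simp [h3, h4]
        · have hc' : c + 1 ≤ 3 := by omega
          rw [ih (c + 1) a hc' (by omega)]
          have hpr := pvPrefRun_cons_self rest a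
          rw [pvRun4_cons a rest]
          have h3' : decide ((3:Int) < c + 1) = false := by simp; omega
          simp only [h3', Bool.false_or]
          cases hrun : pvRun4 rest
          · simp only [Bool.or_false]
            have : decide ((3:Int) < c + 1 + (pvPrefRun rest a : Int)) =
                (decide ((3:Int) < c + (pvPrefRun (a :: rest) a : Int)) ||
                  decide (4 ≤ pvPrefRun (a :: rest) a)) := by
              by_cases hbig : 4 ≤ pvPrefRun (a :: rest) a
              · have : (3:Int) < c + 1 + (pvPrefRun rest a : Int) ∨ True := Or.inr trivial
                by_cases hcneg : (3:Int) < c + 1 + (pvPrefRun rest a : Int)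
                · simp [hcneg, hbig]
                · exfalso
                  omega
              · have heq : ((3:Int) < c + 1 + (pvPrefRun rest a : Int)) ↔
                    ((3:Int) < c + (pvPrefRun (a :: rest) a : Int)) := by
                  constructor <;> intro h <;> omega
                simp [hbig, decide_eq_decide.mpr heq]
            rw [this]
          · simp
      · simp only [pvRb]
        have hnot : ¬ (some a = some x) := by
          simp only [Option.some.injEq]
          exact fun h => hx h.symm
        rw [if_neg hnot]
        rw [ih 1 x (by omega) (by omega)]
        have h0 : pvPrefRun (x :: rest) a = 0 := pvPrefRun_cons_ne rest a x hx
        have hfalse : decide ((3:Int) < c + (pvPrefRun (x :: rest) a : Int)) = false := by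
          rw [h0]; simp; omega
        rw [pvRun4_cons x rest, pvPrefRun_cons_self rest x]
        have heq : decide ((3:Int) < 1 + (pvPrefRun rest x : Int)) =
            decide (4 ≤ pvPrefRun rest x + 1) := by
          apply decide_eq_decide.mpr; omega
        rw [hfalse, heq]
        simp

theorem pvRb_none (l : List Char) (c : Int) : pvRb l c none = pvRun4 l := by
  cases l with
  | nil => simp [pvRb, pvRun4]
  | cons x rest =>
      simp only [pvRb]
      rw [if_neg (show (none : Option Char) ≠ some x by simp)]
      rw [pvRb_some rest 1 x (by omega) (by omega)]
      rw [pvRun4_cons x rest, pvPrefRun_cons_self rest x]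
      have heq : decide ((3:Int) < 1 + (pvPrefRun rest x : Int)) =
          decide (4 ≤ pvPrefRun rest x + 1) := by
        apply decide_eq_decide.mpr; omega
      rw [heq]
      simp

theorem pvLoop_step (t : String) (x : Char) (rest : List Char) (A B d : Int)
    (hrec : ∀ (c d : Int) (ch : Option Char), 0 ≤ d → d ≤ 4 →
      checkLoop t rest c d ch =
        if (pvRb rest c ch || decide (d + (pvDigits rest : Int) > 4)) then ""
        else (if BaseTokeniser_LOWERCASE then PySem.Str.lower t else t))
    (hdig : (pvDigits (x :: rest) : Int) + d = (pvDigits rest : Int) + B)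
    (hB0 : 0 ≤ B) (hBd : B ≤ d + 1) (hd4 : d ≤ 4) :
    (if A > 3 ∨ B > 4 then "" else checkLoop t rest A B (some x)) =
      if ((decide (A > 3) || pvRb rest A (some x)) || decide (d + (pvDigits (x :: rest) : Int) > 4)) then ""
      else (if BaseTokeniser_LOWERCASE then PySem.Str.lower t else t) := by
  have hdr0 : (0:Int) ≤ (pvDigits rest : Int) := by positivity
  by_cases hA3 : A > 3
  · rw [if_pos (Or.inl hA3)]
    have : decide ((3:Int) < A) = true := decide_eq_true hA3
    simp [this]
  · by_cases hB4 : B > 4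
    · rw [if_pos (Or.inr hB4)]
      have : decide ((4:Int) < d + (pvDigits (x :: rest) : Int)) = true :=
        decide_eq_true (by omega)
      simp [this]
    · rw [if_neg (by push_neg; exact ⟨by omega, by omega⟩)]
      rw [hrec A B (some x) (by omega) (by omega)]
      have hAf : decide ((3:Int) < A) = false := decide_eq_false (by omega)
      have hde : decide ((4:Int) < d + (pvDigits (x :: rest) : Int)) =
          decide ((4:Int) < B + (pvDigits rest : Int)) := by
        apply decide_eq_decide.mpr
        constructor <;> intro h <;> omega
      rw [hAf, hde]
      simp

theorem pvLoop_eq (t : String) (l : List Char) : ∀ (c d : Int) (ch : Option Char),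
    0 ≤ d → d ≤ 4 →
    checkLoop t l c d ch =
      if (pvRb l c ch || decide (d + (pvDigits l : Int) > 4)) then ""
      else (if BaseTokeniser_LOWERCASE then PySem.Str.lower t else t) := by
  induction l with
  | nil =>
      intro c d ch h0 h4
      simp only [checkLoop, pvRb, pvDigits, List.countP_nil, Nat.cast_zero, add_zero, Bool.false_or]
      have hd : decide ((4:Int) < d) = false := decide_eq_false (by omega)
      rw [hd]
      simp
  | cons x rest ih =>
      intro c d ch h0 h4
      have hdig : (pvDigits (x :: rest) : Int) + d =
          (pvDigits rest : Int) + (if PySem.Chars.isdigit x = true then d + 1 else d) := by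
        simp only [pvDigits, List.countP_cons]
        by_cases hx : PySem.Chars.isdigit x = true <;> simp [hx] <;> push_cast <;> ring
      simp only [checkLoop, pvRb, BaseTokeniser_maxNumOfSameConseqLettersPerTerm,
        BaseTokeniser_maxNumOfDigitsPerTerm]
      exact pvLoop_step t x rest _ _ d ih hdig (by split <;> omega) (by split <;> omega) h4

set_option maxHeartbeats 1000000 in
theorem pvSet4 (x b c d : Char) :
    (PySem.Set.len (PySem.Set.ofList [x, b, c, d]) == 1) = decide (b = x ∧ c = x ∧ d = x) := by
  by_cases hb : b = x <;> by_cases hc : c = x <;> by_cases hd : d = x <;>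
    simp [PySem.Set.ofList, PySem.Set.add, PySem.Set.len, PySem.Set.contains, hb, hc, hd] <;>
    (repeat' split) <;> simp

theorem pvWindow_eq_run4 (l : List Char) :
    ((PySem.List.pyRange 0 ((l.length : Int) - 4 + 1) 1).any
        (fun i => PySem.Set.len (PySem.Set.ofList (PySem.List.slice l (some i) (some (i + 4)))) == 1))
      = pvRun4 l := by
  induction l with
  | nil => rw [PySem.List.pyRange_one_eq_nil (by simp)]; simp [pvRun4]
  | cons x rest ih =>
      match rest with
      | [] => rw [PySem.List.pyRange_one_eq_nil (by simp)]; simp [pvRun4]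
      | [b] => rw [PySem.List.pyRange_one_eq_nil (by simp)]; simp [pvRun4]
      | [b, c] => rw [PySem.List.pyRange_one_eq_nil (by simp)]; simp [pvRun4]
      | b :: c :: d :: r =>
        have hm : (0:Int) < (((x :: b :: c :: d :: r).length : Int) - 4 + 1) := by simp; omega
        rw [PySem.List.pyRange_one_cons hm]
        simp only [List.any_cons]
        have hP0 : (PySem.Set.len (PySem.Set.ofList
            (PySem.List.slice (x :: b :: c :: d :: r) (some (0:Int)) (some ((0:Int) + 4)))) == 1)
            = decide (b = x ∧ c = x ∧ d = x) := by
          have h4 : ((0:Int) + 4) = ((4:Nat) : Int) := by norm_num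
          rw [h4, PySem.List.slice_zero_start, PySem.List.slice_to_natCast]
          simp only [List.take_succ_cons, List.take_zero]
          exact pvSet4 x b c d
        have htail : ((PySem.List.pyRange (0+1) (((x :: b :: c :: d :: r).length : Int) - 4 + 1) 1).any
            (fun i => PySem.Set.len (PySem.Set.ofList
              (PySem.List.slice (x :: b :: c :: d :: r) (some i) (some (i + 4)))) == 1))
            = pvRun4 (b :: c :: d :: r) := by
          rw [← ih]
          rw [PySem.List.pyRange_one, PySem.List.pyRange_one]
          have hK : ((((x :: b :: c :: d :: r).length : Int) - 4 + 1) - (0+1)).toNat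
              = ((((b :: c :: d :: r).length : Int) - 4 + 1) - 0).toNat := by
            simp; omega
          rw [hK]
          simp only [List.any_map]
          congr 1
          funext k
          simp only [Function.comp]
          have h1 : ((0:Int) + 1 + (k:Int)) = (((k + 1 : Nat)) : Int) := by push_cast; ring
          have h3 : ((0:Int) + (k:Int)) = ((k : Nat) : Int) := by push_cast; ring
          rw [h1, h3]
          have h2 : (((k + 1 : Nat)) : Int) + 4 = ((k + 5 : Nat) : Int) := by push_cast; ring
          have h4 : ((k : Nat) : Int) + 4 = ((k + 4 : Nat) : Int) := by push_cast; ring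
          rw [h2, h4, PySem.List.slice_natCast, PySem.List.slice_natCast]
          have h5 : k + 5 - (k + 1) = 4 := by omega
          have h6 : k + 4 - k = 4 := by omega
          rw [h5, h6, List.drop_succ_cons]
        rw [hP0, htail]
        simp [pvRun4]

theorem check_eq (s : String) :
    check s =
      (if (pvRun4 (PySem.Str.strip s).toList ||
            decide ((pvDigits (PySem.Str.strip s).toList : Int) > 4)) then ""
       else PySem.Str.lower (PySem.Str.strip s)) := by
  simp only [check]
  rw [pvLoop_eq _ _ 0 0 none (by omega) (by omega)]
  rw [pvRb_none]
  simp only [BaseTokeniser_LOWERCASE, if_true, zero_add]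

theorem check_alt_eq (s : String) :
    check_alt s =
      (if (pvRun4 (PySem.Str.strip s).toList ||
            decide ((pvDigits (PySem.Str.strip s).toList : Int) > 4)) then ""
       else PySem.Str.lower (PySem.Str.strip s)) := by
  simp only [check_alt, BaseTokeniser_LOWERCASE, BaseTokeniser_maxNumOfSameConseqLettersPerTerm,
    BaseTokeniser_maxNumOfDigitsPerTerm, if_true]
  have hw : ((3:Int) + 1) = 4 := by norm_num
  rw [hw]
  rw [pvWindow_eq_run4 (PySem.Str.strip s).toList]
  by_cases hd : ((pvDigits (PySem.Str.strip s).toList : Int) > 4)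
  · rw [if_pos (by simpa [pvDigits] using hd)]
    have hd' : decide (((pvDigits (PySem.Str.strip s).toList : Int)) > 4) = true := decide_eq_true hd
    rw [hd', Bool.or_true]
    simp
  · rw [if_neg (by simpa [pvDigits] using hd)]
    have hd' : decide (((pvDigits (PySem.Str.strip s).toList : Int)) > 4) = false := decide_eq_false hd
    cases hr : pvRun4 (PySem.Str.strip s).toList
    · rw [hd']
      simp
    · simp

-- ===== VERDICT (by name: the statement is the Claim_ definition above) =====
theorem check_spec : Claim_equal_check := by
  intro s _
  unfold Spec_check
  rw [check_eq, check_alt_eq]
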